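-- pv_equiv track=rewrite | github.com/huhji-elha/Daily_Coding_Practice | programmers/124나라.py | solution
-- ===== SOURCE A (Python) =====
-- def solution(n):
--     ll = []
--     while True:
--         if n//3 > 0:
--             if n%3 == 0:
--                 ll.append(3)
--                 n = n//3 - 1
--             else:
--                 ll.append(n%3)
--                 n = n//3
--         else:
--             if n > 0: ll.append(n)
--             break
--     return ''.join(map(str, ll[::-1])).replace('3','4')
-- ===== SOURCE B (Python) =====
-- def solution(n):
--     if n <= 0:
--         return ''
--     return solution((n - 1) // 3) + "412"[n % 3]
-- ===== Notes on version B (the rewrite author's own statement) =====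
-- stated objective: simpler
-- what changed: Replaces the explicit list-building while-loop, the list reversal and the final str.replace('3','4') with a three-line recursion on the quotient: solution((n-1)//3) + "412"[n%3], which collapses A's two quotient cases and absorbs the digit substitution into a lookup table.
import Mathlib
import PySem

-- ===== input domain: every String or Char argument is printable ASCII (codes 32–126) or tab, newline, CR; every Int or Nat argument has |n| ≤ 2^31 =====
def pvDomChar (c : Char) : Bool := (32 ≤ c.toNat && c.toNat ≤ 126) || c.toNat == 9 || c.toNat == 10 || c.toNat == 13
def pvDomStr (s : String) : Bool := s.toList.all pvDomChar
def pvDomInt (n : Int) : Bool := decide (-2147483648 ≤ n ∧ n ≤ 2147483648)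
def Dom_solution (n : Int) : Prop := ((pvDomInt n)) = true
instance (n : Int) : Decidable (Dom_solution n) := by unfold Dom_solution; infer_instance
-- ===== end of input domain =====

-- B replaces A's list-building while-loop, the ll[::-1] reversal and the final
-- str.replace('3','4') by a short recursion on the quotient with digit table "412" (objective: simpler).

-- ===== PORT A =====
-- the while-loop: state is (n, ll); each iteration appends a digit and shrinks n, or exits
def solutionGo (n : Int) (ll : List Int) : List Int :=
  if PySem.Int.floordiv n 3 > 0 then
    if PySem.Int.mod n 3 = 0 then
      solutionGo (PySem.Int.floordiv n 3 - 1) (ll ++ [3])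
    else
      solutionGo (PySem.Int.floordiv n 3) (ll ++ [PySem.Int.mod n 3])
  else
    if n > 0 then ll ++ [n] else ll
termination_by n.toNat
decreasing_by
  · have h3 : (0:Int) < 3 := by norm_num
    rw [PySem.Int.floordiv_eq_ediv_of_pos h3] at *
    omega
  · have h3 : (0:Int) < 3 := by norm_num
    rw [PySem.Int.floordiv_eq_ediv_of_pos h3] at *
    omega

def solution (n : Int) : String :=
  -- ll[::-1] is slice? … (-1); the step -1 is nonzero, so it is always `some` and getD never defaults
  PySem.Str.replace
    (PySem.Str.join ""
      (((PySem.List.slice? (solutionGo n []) none none (-1)).getD []).map PySem.Int.toStr))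
    "3" "4"

-- ===== PORT B =====
-- Source B: if n <= 0: '' else solution((n-1)//3) + "412"[n % 3], built on List Char
-- (Lean's own String.append is kernel-opaque); "412"[n % 3] is pyGet? into ['4','1','2'],
-- whose Option is emptied/unwrapped with .toList (the index n % 3 is always in range)
def solutionAltChars (n : Int) : List Char :=
  if n ≤ 0 then []
  else
    solutionAltChars (PySem.Int.floordiv (n - 1) 3)
      ++ (PySem.List.pyGet? ['4', '1', '2'] (PySem.Int.mod n 3)).toList
termination_by n.toNat
decreasing_by
  have h3 : (0:Int) < 3 := by norm_num
  rw [PySem.Int.floordiv_eq_ediv_of_pos h3]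
  omega

def solution_alt (n : Int) : String := String.ofList (solutionAltChars n)

-- ===== PRECONDITION & SPEC =====
-- A is total (the loop always terminates and returns a string), so no Pre_
def Spec_solution (n : Int) (out : String) : Prop := out = solution_alt n
instance (n : Int) (out : String) : Decidable (Spec_solution n out) := by unfold Spec_solution; infer_instance

-- ===== CLAIM (what is proved, stated in full; the proofs are below) =====
def Claim_equal_solution : Prop := ∀ (n : Int), Dom_solution n → Spec_solution n (solution n)

-- ===== LEMMAS AND PROOFS =====

def pvSubst (c : Char) : Char := if c = '3' then '4' else c
theorem pvReplaceGo_eq (l acc : List Char) (fuel : Nat) (h : l.length ≤ fuel) :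
    PySem.Chars.replace.go ['3'] ['4'] fuel l acc = acc.reverse ++ l.map pvSubst := by
  induction l generalizing acc fuel with
  | nil =>
      cases fuel with
      | zero => simp [PySem.Chars.replace.go]
      | succ fuel => simp [PySem.Chars.replace.go]
  | cons c t ih =>
      cases fuel with
      | zero => simp at h
      | succ fuel =>
          rw [PySem.Chars.replace.go]
          by_cases hc : c = '3'
          · subst hc
            rw [if_pos (by simp [List.isPrefixOf])]
            rw [show List.drop ['3'].length ('3'::t) = t from rfl]
            rw [ih _ fuel (by simpa using Nat.le_of_succ_le_succ h)]
            simp [pvSubst]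
          · rw [if_neg (by simp [List.isPrefixOf]; exact fun h => hc h.symm)]
            rw [ih _ fuel (by simpa using Nat.le_of_succ_le_succ h)]
            simp [pvSubst, hc]
theorem pvReplace_eq (cs : List Char) :
    PySem.Chars.replace cs ['3'] ['4'] = cs.map pvSubst := by
  rw [PySem.Chars.replace]
  simp only [List.isEmpty_cons, if_neg (by decide : ¬ (false = true))]
  exact pvReplaceGo_eq cs [] cs.length le_rfl

theorem pvSolutionGo_acc (n : Int) (ll : List Int) :
    solutionGo n ll = ll ++ solutionGo n [] := by
  induction hn : n.toNat using Nat.strong_induction_on generalizing n ll with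
  | _ fuel ih =>
    subst hn
    have h3 : (0:Int) < 3 := by norm_num
    rw [solutionGo]
    conv_rhs => rw [solutionGo]
    by_cases h : PySem.Int.floordiv n 3 > 0
    · have hlt0 : ((PySem.Int.floordiv n 3 - 1).toNat < n.toNat) := by
        rw [PySem.Int.floordiv_eq_ediv_of_pos h3] at *; omega
      have hlt1 : ((PySem.Int.floordiv n 3).toNat < n.toNat) := by
        rw [PySem.Int.floordiv_eq_ediv_of_pos h3] at *; omega
      by_cases hm : PySem.Int.mod n 3 = 0
      · simp only [if_pos h, if_pos hm]
        rw [ih _ hlt0 _ (ll ++ [3]) rfl, ih _ hlt0 _ ([] ++ [3]) rfl]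
        simp
      · simp only [if_pos h, if_neg hm]
        rw [ih _ hlt1 _ (ll ++ [PySem.Int.mod n 3]) rfl,
           ih _ hlt1 _ ([] ++ [PySem.Int.mod n 3]) rfl]
        simp
    · simp only [if_neg h]
      split <;> simp

-- the character string A produces, after the final replace
def pvAChars (n : Int) : List Char :=
  (((solutionGo n []).reverse).map PySem.Int.toChars).flatten.map pvSubst

theorem intersperse_nil_flatten (xss : List (List Char)) :
    (List.intersperse ([]:List Char) xss).flatten = xss.flatten := by
  induction xss with
  | nil => simp
  | cons x xs ih => cases xs <;> simp_all [List.intersperse]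

theorem pvSolution_eq (n : Int) : solution n = String.ofList (pvAChars n) := by
  rw [solution, PySem.List.slice?_none_none_neg_one]
  rw [PySem.Str.replace, PySem.Str.join]
  simp only [Option.getD_some, String.toList_ofList]
  rw [show ("3":String).toList = ['3'] from rfl, show ("4":String).toList = ['4'] from rfl]
  rw [pvReplace_eq, pvAChars]
  congr 1
  rw [PySem.Chars.join, show ("":String).toList = ([]:List Char) from rfl,
    List.intercalate, intersperse_nil_flatten, List.map_map]
  congr 1
  have hts : (String.toList ∘ PySem.Int.toStr) = PySem.Int.toChars :=
    funext fun m => PySem.Int.toList_toStr m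
  rw [hts]

theorem pvChars_eq (n : Int) : pvAChars n = solutionAltChars n := by
  induction hn : n.toNat using Nat.strong_induction_on generalizing n with
  | _ fuel ih =>
    subst hn
    have h3 : (0:Int) < 3 := by norm_num
    have hfd : PySem.Int.floordiv n 3 = n / 3 := PySem.Int.floordiv_eq_ediv_of_pos h3
    have hmd : PySem.Int.mod n 3 = n % 3 := PySem.Int.mod_eq_emod_of_pos h3
    have hfd1 : PySem.Int.floordiv (n - 1) 3 = (n - 1) / 3 :=
      PySem.Int.floordiv_eq_ediv_of_pos h3
    have c1 : PySem.Int.toChars 1 = ['1'] := by decide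
    have c2 : PySem.Int.toChars 2 = ['2'] := by decide
    have c3 : PySem.Int.toChars 3 = ['3'] := by decide
    have g0 : PySem.List.pyGet? ['4', '1', '2'] (0:Int) = some '4' := by decide
    have g1 : PySem.List.pyGet? ['4', '1', '2'] (1:Int) = some '1' := by decide
    have g2 : PySem.List.pyGet? ['4', '1', '2'] (2:Int) = some '2' := by decide
    by_cases hpos : n ≤ 0
    · have hq : ¬ PySem.Int.floordiv n 3 > 0 := by rw [hfd]; omega
      have hng : ¬ n > 0 := by omega
      rw [pvAChars, solutionGo, if_neg hq, if_neg hng, solutionAltChars, if_pos hpos]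
      simp
    · have hpos' : 0 < n := by omega
      have hn0 : ¬ n ≤ 0 := hpos
      by_cases hbig : n ≥ 3
      · have hq : PySem.Int.floordiv n 3 > 0 := by rw [hfd]; omega
        by_cases hm : PySem.Int.mod n 3 = 0
        · have hm' : n % 3 = 0 := by rw [← hmd]; exact hm
          have hstep : (n - 1) / 3 = PySem.Int.floordiv n 3 - 1 := by rw [hfd]; omega
          have hlt : (PySem.Int.floordiv n 3 - 1).toNat < n.toNat := by rw [hfd]; omega
          rw [pvAChars, solutionGo, if_pos hq, if_pos hm, pvSolutionGo_acc]
          rw [solutionAltChars, if_neg hn0, hfd1, hstep]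
          rw [← ih _ hlt _ rfl, pvAChars, hm]
          simp [pvSubst, c3, g0]
        · have hm' : ¬ n % 3 = 0 := by rw [← hmd]; exact hm
          have hstep : (n - 1) / 3 = PySem.Int.floordiv n 3 := by rw [hfd]; omega
          have hlt : (PySem.Int.floordiv n 3).toNat < n.toNat := by rw [hfd]; omega
          rw [pvAChars, solutionGo, if_pos hq, if_neg hm, pvSolutionGo_acc]
          rw [solutionAltChars, if_neg hn0, hfd1, hstep]
          rw [← ih _ hlt _ rfl, pvAChars]
          have h12 : PySem.Int.mod n 3 = 1 ∨ PySem.Int.mod n 3 = 2 := by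
            rw [hmd]; omega
          rcases h12 with h1 | h1 <;> rw [h1]
          · simp [pvSubst, c1, g1]
          · simp [pvSubst, c2, g2]
      · have hbig' : n < 3 := by omega
        have hq : ¬ PySem.Int.floordiv n 3 > 0 := by rw [hfd]; omega
        have hz : (n - 1) / 3 = 0 := by omega
        rw [pvAChars, solutionGo, if_neg hq, if_pos hpos']
        rw [solutionAltChars, if_neg hn0, hfd1, hz, solutionAltChars, if_pos le_rfl]
        have h12 : n = 1 ∨ n = 2 := by omega
        rcases h12 with h1 | h1 <;> subst h1
        · rw [show PySem.Int.mod 1 3 = (1:Int) from by rw [hmd]; decide]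
          simp [pvSubst, c1, g1]
        · rw [show PySem.Int.mod 2 3 = (2:Int) from by rw [hmd]; decide]
          simp [pvSubst, c2, g2]

-- ===== VERDICT (by name: the statement is the Claim_ definition above) =====
theorem solution_spec : Claim_equal_solution := by
  intro n _
  unfold Spec_solution solution_alt
  rw [pvSolution_eq, pvChars_eq]
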